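-- pv_equiv track=rewrite | github.com/andrewdyates/tla2 | scripts/rust_function_span_scan.py | _char_literal_len
-- ===== SOURCE A (Python) =====
-- def _is_hex_digit(ch: str) -> bool:
--     return ch in "0123456789abcdefABCDEF"
--
-- def _char_literal_len(source: str, start: int) -> int:
--     """Return char literal length starting at `start`, or 0 if not a char literal."""
--     if start + 2 >= len(source) or source[start] != "'":
--         return 0
--     i = start + 1
--     if source[i] == "\\":
--         i += 1
--         if i >= len(source):
--             return 0
--         esc = source[i]
--         if esc == "x":
--             if i + 2 >= len(source):
--                 return 0
--             if not (_is_hex_digit(source[i + 1]) and _is_hex_digit(source[i + 2])):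
--                 return 0
--             i += 3
--         elif esc == "u":
--             i += 1
--             if i >= len(source) or source[i] != "{":
--                 return 0
--             i += 1
--             hex_digits = 0
--             while i < len(source) and _is_hex_digit(source[i]):
--                 hex_digits += 1
--                 i += 1
--             if hex_digits == 0 or i >= len(source) or source[i] != "}":
--                 return 0
--             i += 1
--         else:
--             i += 1
--     else:
--         if source[i] in {"'", "\n", "\r"}:
--             return 0
--         i += 1
--     if i < len(source) and source[i] == "'":
--         return i - start + 1
--     return 0
-- ===== SOURCE B (Python) =====
-- _HEX = "0123456789abcdefABCDEF"
--
--
-- def _at(source, i):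
--     """source[i] with Python index semantics, or None when out of range."""
--     n = len(source)
--     return source[i] if -n <= i < n else None
--
--
-- def _scan_class(source, i, chars):
--     """End index of the run of characters from `chars` starting at index i."""
--     while _at(source, i) is not None and _at(source, i) in chars:
--         i += 1
--     return i
--
--
-- # A Rust char literal is one of four fixed token patterns; token kinds:
-- # ("lit", ch) exact char, ("in", s) one char from s, ("not_in", s) one char
-- # outside s, ("plus", s) a nonempty run of chars from s.
-- _PATTERNS = (
--     (("lit", "'"), ("lit", "\\"), ("lit", "x"), ("in", _HEX), ("in", _HEX), ("lit", "'")),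
--     (("lit", "'"), ("lit", "\\"), ("lit", "u"), ("lit", "{"), ("plus", _HEX), ("lit", "}"), ("lit", "'")),
--     (("lit", "'"), ("lit", "\\"), ("not_in", "xu"), ("lit", "'")),
--     (("lit", "'"), ("not_in", "'\n\r\\"), ("lit", "'")),
-- )
--
--
-- def _match_len(source, pos, pattern):
--     """Length consumed by `pattern` anchored at `pos`, or None on mismatch."""
--     i = pos
--     for kind, arg in pattern:
--         if kind == "plus":
--             end = _scan_class(source, i, arg)
--             if end == i:
--                 return None
--             i = end
--         else:
--             c = _at(source, i)
--             if c is None: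
--                 return None
--             if kind == "lit":
--                 if c != arg:
--                     return None
--             elif kind == "in":
--                 if c not in arg:
--                     return None
--             else:
--                 if c in arg:
--                     return None
--             i += 1
--     return i - pos
--
--
-- def _char_literal_len(source, start):
--     for pattern in _PATTERNS:
--         m = _match_len(source, start, pattern)
--         if m is not None:
--             return m
--     return 0
-- ===== Notes on version B (the rewrite author's own statement) =====
-- stated objective: alternative
-- what changed: Replaces the hand-rolled branching scanner with a tiny table-driven pattern matcher: the four legal char-literal shapes are data (token lists of lit/in/not_in/plus classes) fed to one generic anchored matcher, instead of code paths with a mutating cursor.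
import Mathlib
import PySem

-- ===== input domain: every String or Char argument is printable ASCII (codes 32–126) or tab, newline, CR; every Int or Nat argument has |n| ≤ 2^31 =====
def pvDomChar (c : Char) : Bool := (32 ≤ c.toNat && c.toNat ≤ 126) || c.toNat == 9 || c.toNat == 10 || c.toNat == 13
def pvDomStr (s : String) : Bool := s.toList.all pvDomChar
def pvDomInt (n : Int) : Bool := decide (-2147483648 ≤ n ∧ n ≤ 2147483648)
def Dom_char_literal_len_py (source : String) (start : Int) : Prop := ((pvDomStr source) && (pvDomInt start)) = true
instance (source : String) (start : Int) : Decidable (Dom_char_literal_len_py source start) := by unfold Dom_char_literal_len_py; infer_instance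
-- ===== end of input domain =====

-- B replaces A's hand-rolled branching scanner by a table-driven matcher: the four legal
-- char-literal shapes are token-pattern data fed to one generic anchored matcher; objective:
-- alternative, same cost.

-- ===== PORT A =====
-- _is_hex_digit(ch): ch in "0123456789abcdefABCDEF"
def pvA_isHex (ch : Char) : Bool := "0123456789abcdefABCDEF".toList.contains ch

-- _is_hex_digit(source[i]); only evaluated where Python's access is in range (guarded / under Pre_)
def pvA_isHexAt (cs : List Char) (i : Int) : Bool :=
  ((PySem.List.pyGet? cs i).map pvA_isHex).getD false

-- the `while i < len(source) and _is_hex_digit(source[i])` loop of the \u branch: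
-- returns the final (i, hex_digits)
def pvA_hexLoop (cs : List Char) (i : Int) (hd : Int) : Int × Int :=
  if h : i < (cs.length : Int) ∧ pvA_isHexAt cs i = true then pvA_hexLoop cs (i + 1) (hd + 1)
  else (i, hd)
termination_by ((cs.length : Int) - i).toNat
decreasing_by omega

-- the shared tail `if i < len(source) and source[i] == "'": return i - start + 1 ; return 0`
def pvA_close (cs : List Char) (start i : Int) : Int :=
  if i < (cs.length : Int) ∧ PySem.List.pyGet? cs i = some '\'' then i - start + 1 else 0

-- cursor mutations `i += k` are written as the explicit offset the cursor holds at that point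
def char_literal_len_py (source : String) (start : Int) : Int :=
  let cs := source.toList
  let n : Int := cs.length
  if start + 2 ≥ n ∨ ¬ PySem.List.pyGet? cs start = some '\'' then 0
  else
    -- i = start + 1
    match PySem.List.pyGet? cs (start + 1) with
    | none => 0      -- Python raises here; outside Pre_
    | some c =>
      if c = '\\' then
        -- i += 1 : i = start + 2
        if start + 2 ≥ n then 0
        else
          match PySem.List.pyGet? cs (start + 2) with
          | none => 0  -- Python raises here; outside Pre_
          | some esc =>
            if esc = 'x' then
              if start + 4 ≥ n then 0
              else if ¬ (pvA_isHexAt cs (start + 3) = true ∧ pvA_isHexAt cs (start + 4) = true) then 0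
              else pvA_close cs start (start + 5)          -- i += 3
            else if esc = 'u' then
              -- i += 1 : i = start + 3
              if start + 3 ≥ n ∨ ¬ PySem.List.pyGet? cs (start + 3) = some '{' then 0
              else
                -- i += 1 : i = start + 4 ; hex_digits = 0
                let p := pvA_hexLoop cs (start + 4) 0
                if p.2 = 0 ∨ p.1 ≥ n ∨ ¬ PySem.List.pyGet? cs p.1 = some '}' then 0
                else pvA_close cs start (p.1 + 1)          -- i += 1
            else pvA_close cs start (start + 3)            -- i += 1
      else
        if c = '\'' ∨ c = '\n' ∨ c = '\r' then 0
        else pvA_close cs start (start + 2)                -- i += 1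

-- ===== PORT B =====
-- needed by pvB_scan's termination proof, cited by name there
theorem pvGet_lt_of_some {cs : List Char} {i : Int} {c : Char}
    (h : PySem.List.pyGet? cs i = some c) : -(cs.length : Int) ≤ i ∧ i < (cs.length : Int) := by
  by_contra hc
  have : PySem.List.pyGet? cs i = none := by
    rw [PySem.List.pyGet?_eq_none_iff]
    unfold PySem.Raise.InRange
    omega
  simp [this] at h

-- _at(source, i): source[i] or None when out of range = PySem.List.pyGet?
-- _scan_class(source, i, chars): end of the run of chars from `chars`
def pvB_scan (cs : List Char) (i : Int) (chars : List Char) : Int :=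
  match h : PySem.List.pyGet? cs i with
  | some c => if chars.contains c then pvB_scan cs (i + 1) chars else i
  | none => i
termination_by ((cs.length : Int) - i).toNat
decreasing_by
  have := pvGet_lt_of_some h
  omega

-- token kinds of Source B's patterns
inductive PvTok
  | lit : Char → PvTok
  | inCl : List Char → PvTok
  | notIn : List Char → PvTok
  | plus : List Char → PvTok

def pvHexL : List Char := "0123456789abcdefABCDEF".toList

-- the four patterns of _PATTERNS
def pvPat1 : List PvTok := [.lit '\'', .lit '\\', .lit 'x', .inCl pvHexL, .inCl pvHexL, .lit '\'']
def pvPat2 : List PvTok := [.lit '\'', .lit '\\', .lit 'u', .lit '{', .plus pvHexL, .lit '}', .lit '\'']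
def pvPat3 : List PvTok := [.lit '\'', .lit '\\', .notIn ['x', 'u'], .lit '\'']
def pvPat4 : List PvTok := [.lit '\'', .notIn ['\'', '\n', '\r', '\\'], .lit '\'']

-- the `for kind, arg in pattern` loop of _match_len: final cursor, or none on mismatch
def pvB_go (cs : List Char) (i : Int) : List PvTok → Option Int
  | [] => some i
  | PvTok.lit a :: rest =>
    match PySem.List.pyGet? cs i with
    | some c => if c = a then pvB_go cs (i + 1) rest else none
    | none => none
  | PvTok.inCl s :: rest =>
    match PySem.List.pyGet? cs i with
    | some c => if s.contains c then pvB_go cs (i + 1) rest else none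
    | none => none
  | PvTok.notIn s :: rest =>
    match PySem.List.pyGet? cs i with
    | some c => if s.contains c then none else pvB_go cs (i + 1) rest
    | none => none
  | PvTok.plus s :: rest =>
    let e := pvB_scan cs i s
    if e = i then none else pvB_go cs e rest

-- _match_len: consumed length i - pos, or none
def pvB_matchLen (cs : List Char) (pos : Int) (pat : List PvTok) : Option Int :=
  (pvB_go cs pos pat).map (fun i => i - pos)

-- the `for pattern in _PATTERNS` loop of _char_literal_len
def pvB_tryAll (cs : List Char) (start : Int) : List (List PvTok) → Int
  | [] => 0
  | p :: ps =>
    match pvB_matchLen cs start p with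
    | some m => m
    | none => pvB_tryAll cs start ps

def char_literal_len_py_alt (source : String) (start : Int) : Int :=
  pvB_tryAll source.toList start [pvPat1, pvPat2, pvPat3, pvPat4]

-- ===== PRECONDITION & SPEC =====
-- Pre_ excludes exactly the inputs where Python A raises IndexError at source[start]:
-- start below -len(source) while the length guard start + 2 >= len(source) does not fire.
def Pre_char_literal_len_py (source : String) (start : Int) : Prop :=
  -(source.toList.length : Int) ≤ start ∨ (source.toList.length : Int) ≤ start + 2
instance (source : String) (start : Int) : Decidable (Pre_char_literal_len_py source start) := by
  unfold Pre_char_literal_len_py; infer_instance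

def pvWitness_char_literal_len_py : String × Int := ("'a'", 0)

def Spec_char_literal_len_py (source : String) (start : Int) (out : Int) : Prop :=
  out = char_literal_len_py_alt source start
instance (source : String) (start : Int) (out : Int) : Decidable (Spec_char_literal_len_py source start out) := by
  unfold Spec_char_literal_len_py; infer_instance

-- ===== CLAIM (what is proved, stated in full; the proofs are below) =====
def Claim_equal_char_literal_len_py : Prop := ∀ (source : String) (start : Int), Dom_char_literal_len_py source start → Pre_char_literal_len_py source start → Spec_char_literal_len_py source start (char_literal_len_py source start)

-- ===== LEMMAS AND PROOFS =====

theorem pvGet_isSome {cs : List Char} {i : Int}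
    (h1 : -(cs.length : Int) ≤ i) (h2 : i < (cs.length : Int)) :
    ∃ c, PySem.List.pyGet? cs i = some c := by
  cases hg : PySem.List.pyGet? cs i with
  | none =>
    rw [PySem.List.pyGet?_eq_none_iff] at hg
    exact absurd (by unfold PySem.Raise.InRange; omega) hg
  | some c => exact ⟨c, rfl⟩

theorem pvGet_none_of_ge {cs : List Char} {i : Int} (h : (cs.length : Int) ≤ i) :
    PySem.List.pyGet? cs i = none := by
  rw [PySem.List.pyGet?_eq_none_iff]
  unfold PySem.Raise.InRange
  omega

theorem pvHexAt_some {cs : List Char} {i : Int} {c : Char}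
    (h : PySem.List.pyGet? cs i = some c) : pvA_isHexAt cs i = pvHexL.contains c := by
  unfold pvA_isHexAt pvA_isHex pvHexL
  rw [h]
  rfl

theorem pvB_scan_ge (cs : List Char) (i : Int) (chars : List Char) : i ≤ pvB_scan cs i chars := by
  rw [pvB_scan]
  cases h : PySem.List.pyGet? cs i with
  | none => simp
  | some c =>
    simp only
    split
    · have := pvB_scan_ge cs (i + 1) chars
      omega
    · omega
termination_by ((cs.length : Int) - i).toNat
decreasing_by
  have := pvGet_lt_of_some h
  omega

theorem pvA_hexLoop_eq (cs : List Char) (i hd : Int) :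
    pvA_hexLoop cs i hd = (pvB_scan cs i pvHexL, hd + (pvB_scan cs i pvHexL - i)) := by
  rw [pvA_hexLoop, pvB_scan]
  cases h : PySem.List.pyGet? cs i with
  | none =>
    have hA : ¬ (i < (cs.length : Int) ∧ pvA_isHexAt cs i = true) := by
      unfold pvA_isHexAt
      rw [h]
      simp
    rw [dif_neg hA]
    simp
  | some c =>
    have hrange := pvGet_lt_of_some h
    simp only
    by_cases hx : pvHexL.contains c = true
    · rw [if_pos hx, dif_pos ⟨hrange.2, by rw [pvHexAt_some h]; exact hx⟩]
      rw [pvA_hexLoop_eq cs (i + 1) (hd + 1)]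
      have := pvB_scan_ge cs (i + 1) pvHexL
      simp only [Prod.mk.injEq]
      exact ⟨trivial, by omega⟩
    · rw [if_neg hx, dif_neg (by rw [pvHexAt_some h]; tauto)]
      simp
termination_by ((cs.length : Int) - i).toNat
decreasing_by
  have := pvGet_lt_of_some h
  omega

-- ===== VERDICT (by name: the statement is the Claim_ definition above) =====
theorem char_literal_len_py_spec : Claim_equal_char_literal_len_py := by
  intro source start _hDom hPre
  unfold Spec_char_literal_len_py char_literal_len_py char_literal_len_py_alt
  set cs := source.toList with hcs
  clear_value cs
  have a2 : start + 1 + 1 = start + 2 := by ring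
  have a3 : start + 2 + 1 = start + 3 := by ring
  have a4 : start + 3 + 1 = start + 4 := by ring
  have a5 : start + 4 + 1 = start + 5 := by ring
  have a6 : start + 5 + 1 = start + 6 := by ring
  by_cases hq : PySem.List.pyGet? cs start = some '\''
  case neg =>
    -- quote test fails: A returns 0, every B pattern fails on its first token
    rw [if_pos (Or.inr hq)]
    cases hg : PySem.List.pyGet? cs start with
    | none => simp [pvB_tryAll, pvB_matchLen, pvB_go, pvPat1, pvPat2, pvPat3, pvPat4, hg]
    | some c =>
      have hne : ¬ c = '\'' := by rintro rfl; exact hq hg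
      simp [pvB_tryAll, pvB_matchLen, pvB_go, pvPat1, pvPat2, pvPat3, pvPat4, hg, hne]
  case pos =>
    have hlow := pvGet_lt_of_some hq
    by_cases h2n : start + 2 ≥ (cs.length : Int)
    case pos =>
      -- length guard fires: everything at index ≥ start+2 is out of range
      rw [if_pos (Or.inl h2n)]
      have h2 : PySem.List.pyGet? cs (start + 2) = none := pvGet_none_of_ge (by omega)
      have h3 : PySem.List.pyGet? cs (start + 3) = none := pvGet_none_of_ge (by omega)
      have h4 : PySem.List.pyGet? cs (start + 4) = none := pvGet_none_of_ge (by omega)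
      cases hg1 : PySem.List.pyGet? cs (start + 1) with
      | none => simp [pvB_tryAll, pvB_matchLen, pvB_go, pvPat1, pvPat2, pvPat3, pvPat4, hq, hg1]
      | some d =>
        simp [pvB_tryAll, pvB_matchLen, pvB_go, pvPat1, pvPat2, pvPat3, pvPat4, hq, hg1,
              a2, a3, h2, h3, h4]
    case neg =>
      rw [if_neg (by push_neg; exact ⟨by omega, hq⟩)]
      obtain ⟨c, hc⟩ := pvGet_isSome (by omega : -(cs.length : Int) ≤ start + 1)
        (by omega : start + 1 < (cs.length : Int))
      simp only [hc]
      by_cases hbs : c = '\\'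
      · subst hbs
        rw [if_pos rfl, if_neg (by omega)]
        obtain ⟨esc, hesc⟩ := pvGet_isSome (by omega : -(cs.length : Int) ≤ start + 2)
          (by omega : start + 2 < (cs.length : Int))
        simp only [hesc]
        by_cases hx : esc = 'x'
        · subst hx
          rw [if_pos rfl]
          -- only pattern 1 can match
          by_cases h4n : start + 4 ≥ (cs.length : Int)
          · rw [if_pos h4n]
            cases hg3 : PySem.List.pyGet? cs (start + 3) with
            | none =>
              simp [pvB_tryAll, pvB_matchLen, pvB_go, pvPat1, pvPat2, pvPat3, pvPat4,
                    hq, hc, hesc, a2, a3, hg3]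
            | some c3 =>
              have hg4 : PySem.List.pyGet? cs (start + 4) = none := pvGet_none_of_ge (by omega)
              simp [pvB_tryAll, pvB_matchLen, pvB_go, pvPat1, pvPat2, pvPat3, pvPat4,
                    hq, hc, hesc, a2, a3, a4, hg3, hg4]
          · rw [if_neg h4n]
            obtain ⟨c3, hg3⟩ := pvGet_isSome (by omega : -(cs.length : Int) ≤ start + 3)
              (by omega : start + 3 < (cs.length : Int))
            obtain ⟨c4, hg4⟩ := pvGet_isSome (by omega : -(cs.length : Int) ≤ start + 4)
              (by omega : start + 4 < (cs.length : Int))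
            rw [pvHexAt_some hg3, pvHexAt_some hg4]
            by_cases hm3 : c3 ∈ pvHexL
            · by_cases hm4 : c4 ∈ pvHexL
              · rw [if_neg (by simp [hm3, hm4])]
                unfold pvA_close
                cases hg5 : PySem.List.pyGet? cs (start + 5) with
                | none =>
                  rw [if_neg (by simp)]
                  simp [pvB_tryAll, pvB_matchLen, pvB_go, pvPat1, pvPat2, pvPat3, pvPat4,
                        hq, hc, hesc, a2, a3, a4, a5, hg3, hg4, hm3, hm4, hg5]
                | some c5 =>
                  have h5r := pvGet_lt_of_some hg5
                  by_cases hc5 : c5 = '\''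
                  · subst hc5
                    rw [if_pos ⟨by omega, rfl⟩]
                    simp [pvB_tryAll, pvB_matchLen, pvB_go, pvPat1, hq, hc, hesc,
                          a2, a3, a4, a5, a6, hg3, hg4, hm3, hm4, hg5]
                  · rw [if_neg (by rintro ⟨-, h⟩; exact hc5 (Option.some.inj h))]
                    simp [pvB_tryAll, pvB_matchLen, pvB_go, pvPat1, pvPat2, pvPat3, pvPat4,
                          hq, hc, hesc, a2, a3, a4, a5, hg3, hg4, hm3, hm4, hg5, hc5]
              · rw [if_pos (by simp [hm4])]
                simp [pvB_tryAll, pvB_matchLen, pvB_go, pvPat1, pvPat2, pvPat3, pvPat4,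
                      hq, hc, hesc, a2, a3, a4, hg3, hg4, hm3, hm4]
            · rw [if_pos (by simp [hm3])]
              simp [pvB_tryAll, pvB_matchLen, pvB_go, pvPat1, pvPat2, pvPat3, pvPat4,
                    hq, hc, hesc, a2, a3, hg3, hm3]
        · rw [if_neg hx]
          by_cases hu : esc = 'u'
          · subst hu
            rw [if_pos rfl]
            by_cases hbr : PySem.List.pyGet? cs (start + 3) = some '{'
            · have h3r := pvGet_lt_of_some hbr
              rw [if_neg (by push_neg; exact ⟨by omega, hbr⟩)]
              rw [pvA_hexLoop_eq]
              set e := pvB_scan cs (start + 4) pvHexL with he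
              have hege : start + 4 ≤ e := by rw [he]; exact pvB_scan_ge cs (start + 4) pvHexL
              simp only
              by_cases hcnt : e = start + 4
              · rw [if_pos (Or.inl (by omega))]
                simp [pvB_tryAll, pvB_matchLen, pvB_go, pvPat2, pvPat1, pvPat3, pvPat4,
                      hq, hc, hesc, a2, a3, a4, hbr, ← he, hcnt]
              · cases hge : PySem.List.pyGet? cs e with
                | none =>
                  rw [if_pos (Or.inr (Or.inr (by simp)))]
                  simp [pvB_tryAll, pvB_matchLen, pvB_go, pvPat2, pvPat1, pvPat3, pvPat4,
                        hq, hc, hesc, a2, a3, a4, hbr, ← he, hcnt, hge]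
                | some ce =>
                  have her := pvGet_lt_of_some hge
                  by_cases hbrc : ce = '}'
                  · subst hbrc
                    rw [if_neg (by push_neg; exact ⟨by omega, by omega, rfl⟩)]
                    unfold pvA_close
                    cases hgq : PySem.List.pyGet? cs (e + 1) with
                    | none =>
                      rw [if_neg (by simp)]
                      simp [pvB_tryAll, pvB_matchLen, pvB_go, pvPat2, pvPat1, pvPat3, pvPat4,
                            hq, hc, hesc, a2, a3, a4, hbr, ← he, hcnt, hge, hgq]
                    | some cq =>
                      have hqr := pvGet_lt_of_some hgq
                      by_cases hcq : cq = '\''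
                      · subst hcq
                        rw [if_pos ⟨by omega, rfl⟩]
                        simp [pvB_tryAll, pvB_matchLen, pvB_go, pvPat2, pvPat1,
                              hq, hc, hesc, a2, a3, a4, hbr, ← he, hcnt, hge, hgq]
                        omega
                      · rw [if_neg (by rintro ⟨-, h⟩; exact hcq (Option.some.inj h))]
                        simp [pvB_tryAll, pvB_matchLen, pvB_go, pvPat2, pvPat1, pvPat3, pvPat4,
                              hq, hc, hesc, a2, a3, a4, hbr, ← he, hcnt, hge, hgq, hcq]
                  · rw [if_pos (Or.inr (Or.inr (by intro h; exact hbrc (Option.some.inj h))))]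
                    simp [pvB_tryAll, pvB_matchLen, pvB_go, pvPat2, pvPat1, pvPat3, pvPat4,
                          hq, hc, hesc, a2, a3, a4, hbr, ← he, hcnt, hge, hbrc]
            · rw [if_pos (Or.inr hbr)]
              cases hg3 : PySem.List.pyGet? cs (start + 3) with
              | none =>
                simp [pvB_tryAll, pvB_matchLen, pvB_go, pvPat2, pvPat1, pvPat3, pvPat4,
                      hq, hc, hesc, a2, a3, hg3]
              | some c3 =>
                have hne : ¬ c3 = '{' := by rintro rfl; exact hbr hg3
                simp [pvB_tryAll, pvB_matchLen, pvB_go, pvPat2, pvPat1, pvPat3, pvPat4,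
                      hq, hc, hesc, a2, a3, hg3, hne]
          · rw [if_neg hu]
            unfold pvA_close
            cases hg3 : PySem.List.pyGet? cs (start + 3) with
            | none =>
              rw [if_neg (by simp)]
              simp [pvB_tryAll, pvB_matchLen, pvB_go, pvPat3, pvPat1, pvPat2, pvPat4,
                    hq, hc, hesc, a2, a3, hg3, hx, hu]
            | some c3 =>
              have h3r := pvGet_lt_of_some hg3
              by_cases hc3 : c3 = '\''
              · subst hc3
                rw [if_pos ⟨by omega, rfl⟩]
                simp [pvB_tryAll, pvB_matchLen, pvB_go, pvPat3, pvPat1, pvPat2,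
                      hq, hc, hesc, a2, a3, hg3, hx, hu]
                omega
              · rw [if_neg (by rintro ⟨-, h⟩; exact hc3 (Option.some.inj h))]
                simp [pvB_tryAll, pvB_matchLen, pvB_go, pvPat3, pvPat1, pvPat2, pvPat4,
                      hq, hc, hesc, a2, a3, hg3, hx, hu, hc3]
      · rw [if_neg hbs]
        have hbsne : ¬ c = '\\' := hbs
        by_cases hsp : c = '\'' ∨ c = '\n' ∨ c = '\r'
        · rw [if_pos hsp]
          have hin : c ∈ (['\'', '\n', '\r', '\\'] : List Char) := by
            rcases hsp with h | h | h <;> simp [h]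
          simp [pvB_tryAll, pvB_matchLen, pvB_go, pvPat4, pvPat1, pvPat2, pvPat3,
                hq, hc, hbsne, hin]
        · rw [if_neg hsp]
          push_neg at hsp
          unfold pvA_close
          cases hg2 : PySem.List.pyGet? cs (start + 2) with
          | none =>
            rw [if_neg (by simp)]
            simp [pvB_tryAll, pvB_matchLen, pvB_go, pvPat4, pvPat1, pvPat2, pvPat3,
                  hq, hc, hbsne, hsp.1, hsp.2.1, hsp.2.2, a2, hg2]
          | some c2 =>
            have h2r := pvGet_lt_of_some hg2
            by_cases hc2 : c2 = '\''
            · subst hc2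
              rw [if_pos ⟨by omega, rfl⟩]
              simp [pvB_tryAll, pvB_matchLen, pvB_go, pvPat4, pvPat1, pvPat2, pvPat3,
                    hq, hc, hbsne, hsp.1, hsp.2.1, hsp.2.2, a2, hg2]
              omega
            · rw [if_neg (by rintro ⟨-, h⟩; exact hc2 (Option.some.inj h))]
              simp [pvB_tryAll, pvB_matchLen, pvB_go, pvPat4, pvPat1, pvPat2, pvPat3,
                    hq, hc, hbsne, hsp.1, hsp.2.1, hsp.2.2, a2, hg2, hc2]
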